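-- pv_equiv track=rewrite | github.com/tinichu316/EngineeringDesignProblems | Design Project 4.py | stairCase
-- ===== SOURCE A (Python) =====
-- def stairCase(A):
--     emptyCols = []
--     for currentCol in range(len(A)):
--         for i in range(len(A)-1,-1,-1):
--             if A[i][currentCol] == 0 and A[i][:currentCol] == [0]*len(A[i][:currentCol]):
--                 #move to the last row
--                 A.append(A[i])
--                 del A[i]
--         if all(A[i][currentCol] == 0 for i in range(len(A))):
--             emptyCols.append(currentCol)
--     return A, emptyCols
-- ===== SOURCE B (Python) =====
-- def stairCase(A):
--     # Bucket the rows by their leading-zero count (a single pass with one dict of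
--     # lists), then rebuild the matrix as the buckets in increasing key order and
--     # scan once for all-zero columns. Mutates A in place to the reordered matrix.
--     R = len(A)
--
--     def lead(row):
--         n = 0
--         for x in row[:R]:
--             if x != 0:
--                 break
--             n += 1
--         return n
--
--     groups = {}
--     for row in A:
--         groups.setdefault(lead(row), []).append(row)
--     A[:] = [row for k in range(R + 1) for row in groups.get(k, [])]
--     emptyCols = [c for c in range(R) if all(row[c] == 0 for row in A)]
--     return A, emptyCols
-- ===== Notes on version B (the rewrite author's own statement) =====
-- stated objective: faster
-- what changed: B computes each row's leading-zero count once and bucket-sorts the rows by it in one grouping pass, replacing A's R bottom-up move-to-end passes that re-test an O(C) slice per row per column; Pre_ excludes matrices where A raises IndexError (some row shorter than the number of rows) and matrices where some group of rows sharing an odd leading-zero count is not order-symmetric, whose relative order is an accidental tie artefact of A's repeated bottom-up move-to-end.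
-- outside the precondition, e.g. on stairCase([[0, 1], [0, 2]]): A returns ([[0, 2], [0, 1]], [0]), B returns ([[0, 1], [0, 2]], [0])
import Mathlib
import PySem

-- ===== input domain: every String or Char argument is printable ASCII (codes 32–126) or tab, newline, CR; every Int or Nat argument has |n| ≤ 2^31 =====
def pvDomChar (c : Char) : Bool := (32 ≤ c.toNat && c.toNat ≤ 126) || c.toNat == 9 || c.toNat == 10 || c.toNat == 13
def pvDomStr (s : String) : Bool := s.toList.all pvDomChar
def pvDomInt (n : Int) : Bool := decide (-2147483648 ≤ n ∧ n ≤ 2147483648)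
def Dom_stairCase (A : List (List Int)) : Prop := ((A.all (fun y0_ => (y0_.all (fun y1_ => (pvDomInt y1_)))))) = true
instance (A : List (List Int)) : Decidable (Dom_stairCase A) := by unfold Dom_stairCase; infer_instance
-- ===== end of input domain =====

-- B bucket-sorts the rows by their leading-zero count in one grouping pass instead
-- of A's per-column bottom-up move-to-end passes with repeated slice tests;
-- equivalence is about the return value (both Pythons mutate A in place to the
-- same final row order inside Pre_).

-- ===== PORT A =====
-- 'A[i][currentCol] == 0 and A[i][:currentCol] == [0]*len(A[i][:currentCol])'
def pvCondA (c : Nat) (row : List Int) : Bool :=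
  ((PySem.List.pyGet? row (c : Int)).getD 1 == 0) &&
  (let s := PySem.List.slice row none (some (c : Int));
   s == List.replicate s.length 0)

-- 'for i in range(len(A)-1,-1,-1): if …: A.append(A[i]); del A[i]'
-- (processes indices n-1, n-2, …, 0; append-then-del at a valid index = eraseIdx-then-append)
def pvMove (c : Nat) : Nat → List (List Int) → List (List Int)
  | 0, M => M
  | n + 1, M =>
    let row := (PySem.List.pyGet? M (n : Int)).getD []
    if pvCondA c row then pvMove c n (M.eraseIdx n ++ [row])
    else pvMove c n M

-- the emptiness test 'all(A[i][currentCol] == 0 for i in range(len(A)))' is the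
-- same index loop over the unchanged list M, ported as M.all
def stairCase (A : List (List Int)) : List (List Int) × List Int :=
  (List.range A.length).foldl
    (fun st c =>
      let M := pvMove c st.1.length st.1
      if M.all (fun row => (PySem.List.pyGet? row (c : Int)).getD 1 == 0)
      then (M, st.2 ++ [(c : Int)])
      else (M, st.2))
    (A, [])

-- ===== PORT B =====
-- 'lead(row)': count of leading zeros of row[:R]
def pvLz : List Int → Nat
  | [] => 0
  | x :: t => if x == 0 then pvLz t + 1 else 0

def pvLead (R : Nat) (row : List Int) : Nat :=
  pvLz (PySem.List.slice row none (some (R : Int)))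

def stairCase_alt (A : List (List Int)) : List (List Int) × List Int :=
  let R := A.length
  -- 'groups = {}; for row in A: groups.setdefault(lead(row), []).append(row)'
  let groups := A.foldl
    (fun (d : PySem.Dict Nat (List (List Int))) row =>
      d.modify (pvLead R row) [] (· ++ [row])) PySem.Dict.empty
  -- '[row for k in range(R+1) for row in groups.get(k, [])]'
  let ordered := (List.range (R + 1)).foldl (fun acc k => acc ++ groups.getD k []) []
  -- '[c for c in range(R) if all(row[c] == 0 for row in A)]'
  let emptyCols := ((List.range R).filter
      (fun (c : Nat) => A.all (fun row => (PySem.List.pyGet? row (c : Int)).getD 1 == 0))).map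
      (fun (c : Nat) => ((c : Int)))
  (ordered, emptyCols)

-- ===== PRECONDITION & SPEC =====
-- Pre_ excludes (a) inputs where A raises IndexError (some row shorter than the
-- number of rows) and (b) matrices in which some group of rows sharing the same
-- ODD leading-zero count is not order-symmetric: the relative order of such tied
-- rows in A's output is an accidental artefact of its repeated bottom-up
-- move-to-end (it reverses exactly the odd groups), which no caller would specify.
def Pre_stairCase (A : List (List Int)) : Prop :=
  (∀ row ∈ A, A.length ≤ row.length) ∧
  ∀ k ∈ List.range (A.length + 1), k % 2 = 1 →
    A.filter (fun r => min (pvLz r) A.length == k)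
      = (A.filter (fun r => min (pvLz r) A.length == k)).reverse
instance (A : List (List Int)) : Decidable (Pre_stairCase A) := by unfold Pre_stairCase; infer_instance
def pvWitness_stairCase : List (List Int) := [[0, 1], [1, 0]]
def Spec_stairCase (A : List (List Int)) (out : List (List Int) × List Int) : Prop := out = stairCase_alt A
instance (A : List (List Int)) (out : List (List Int) × List Int) : Decidable (Spec_stairCase A out) := by unfold Spec_stairCase; infer_instance

-- ===== CLAIM (what is proved, stated in full; the proofs are below) =====
def Claim_equal_stairCase : Prop := ∀ (A : List (List Int)), Dom_stairCase A → Pre_stairCase A → Spec_stairCase A (stairCase A)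

-- ===== LEMMAS AND PROOFS =====
-- bucket k (rows whose key min(lead,R) is k), its A-side parity-reversed form,
-- the already-placed prefix after the first c column passes, and the moving tail
def pvG (A : List (List Int)) (k : Nat) : List (List Int) :=
  A.filter (fun r => min (pvLz r) A.length == k)

def pvAlt (A : List (List Int)) (k : Nat) : List (List Int) :=
  if k % 2 == 0 then pvG A k else (pvG A k).reverse

def pvPrefix (A : List (List Int)) (c : Nat) : List (List Int) :=
  (List.range c).foldl (fun acc k => acc ++ pvAlt A k) []

def pvT (A : List (List Int)) (c : Nat) : List (List Int) :=
  A.filter (fun r => decide (c ≤ pvLz r))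

def pvTail (A : List (List Int)) (c : Nat) : List (List Int) :=
  if c % 2 == 0 then pvT A c else (pvT A c).reverse

theorem pvCondA_unfold (c : Nat) (row : List Int) :
    pvCondA c row = ((row[c]?.getD 1 == 0) && (row.take c == List.replicate (min c row.length) 0)) := by
  simp [pvCondA, PySem.List.slice_to_natCast, List.length_take]

theorem pvCondA_eq (row : List Int) : ∀ (c : Nat),
    pvCondA c row = decide (c < pvLz row) := by
  induction row with
  | nil =>
    intro c
    simp [pvCondA_unfold, pvLz]
  | cons x t ih =>
    intro c
    cases c with
    | zero =>
      simp only [pvCondA_unfold, pvLz]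
      by_cases hx : x = 0 <;> simp [hx]
    | succ c =>
      simp only [pvCondA_unfold, pvLz, List.take_succ_cons, List.length_cons,
        List.getElem?_cons_succ]
      by_cases hx : x = 0
      · have hmin : min (c + 1) (t.length + 1) = min c t.length + 1 := by omega
        have h2 : ((0 : Int) :: List.take c t == 0 :: List.replicate (min c t.length) 0)
            = (List.take c t == List.replicate (min c t.length) 0) := by simp
        rw [hx, hmin, List.replicate_succ, h2, ← pvCondA_unfold, ih]
        simp [Nat.succ_lt_succ_iff]
      · simp [hx, List.replicate_succ]

theorem pvMove_eq (c : Nat) : ∀ (n : Nat) (M : List (List Int)), n ≤ M.length →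
    pvMove c n M =
      (M.take n).filter (fun r => !decide (c < pvLz r)) ++ M.drop n ++
        ((M.take n).filter (fun r => decide (c < pvLz r))).reverse := by
  intro n
  induction n with
  | zero => intro M h; simp [pvMove]
  | succ n ih =>
    intro M h
    have hn : n < M.length := by omega
    have hrow : (PySem.List.pyGet? M ((n : Nat) : Int)).getD [] = M[n] := by
      rw [PySem.List.pyGet?_natCast]
      simp [List.getElem?_eq_getElem hn]
    have htake : M.take (n + 1) = M.take n ++ [M[n]] := by
      rw [List.take_succ]
      simp [List.getElem?_eq_getElem hn]
    simp only [pvMove, hrow, pvCondA_eq]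
    by_cases hc : c < pvLz M[n]
    · rw [if_pos (by simpa using hc)]
      have he : M.eraseIdx n = M.take n ++ M.drop (n + 1) := List.eraseIdx_eq_take_drop_succ M n
      have hlen : n ≤ (M.eraseIdx n ++ [M[n]]).length := by
        simp [List.length_eraseIdx, hn]; omega
      rw [ih _ hlen]
      have hL : (M.eraseIdx n ++ [M[n]]).take n = M.take n := by
        rw [he, List.append_assoc, List.take_append_of_le_length (by simp [List.length_take]; omega)]
        simp [List.take_take]
      have hD : (M.eraseIdx n ++ [M[n]]).drop n = M.drop (n + 1) ++ [M[n]] := by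
        rw [he, List.append_assoc, List.drop_append_of_le_length (by simp [List.length_take]; omega)]
        simp [List.length_take, Nat.min_eq_left (le_of_lt hn)]
      rw [hL, hD]
      conv_rhs => rw [htake]
      simp only [List.filter_append, List.filter_cons, List.filter_nil, hc, decide_true,
        Bool.not_true, if_true, if_false, List.reverse_append, List.reverse_cons,
        List.reverse_nil, List.nil_append, List.append_nil, List.append_assoc]
      simp
    · rw [if_neg (by simpa using hc)]
      rw [ih _ (le_of_lt hn)]
      conv_rhs => rw [htake]
      simp only [List.filter_append, List.filter_cons, List.filter_nil, hc, decide_false,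
        Bool.not_false, if_true, if_false, List.reverse_append, List.reverse_nil,
        List.nil_append, List.append_nil, List.append_assoc]
      rw [List.drop_eq_getElem_cons hn]
      simp only [List.cons_append]
      simp

theorem pvPass_eq (c : Nat) (M : List (List Int)) :
    pvMove c M.length M =
      M.filter (fun r => !decide (c < pvLz r)) ++
        (M.filter (fun r => decide (c < pvLz r))).reverse := by
  rw [pvMove_eq c M.length M le_rfl]
  simp

theorem pvPass_perm (c : Nat) (M : List (List Int)) :
    (pvMove c M.length M).Perm M := by
  rw [pvPass_eq]
  refine List.Perm.trans (List.Perm.append_left _ (List.reverse_perm _)) ?_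
  have := List.filter_append_perm (fun r => !decide (c < pvLz r)) M
  simpa using this

theorem pvPrefix_succ (A : List (List Int)) (c : Nat) :
    pvPrefix A (c + 1) = pvPrefix A c ++ pvAlt A c := by
  simp [pvPrefix, List.range_succ]

theorem mem_pvPrefix_lz (A : List (List Int)) (c : Nat) (hc : c ≤ A.length) :
    ∀ r ∈ pvPrefix A c, pvLz r < c := by
  induction c with
  | zero => simp [pvPrefix]
  | succ c ih =>
    intro r hr
    rw [pvPrefix_succ] at hr
    rcases List.mem_append.mp hr with h | h
    · exact Nat.lt_succ_of_lt (ih (by omega) r h)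
    · have hg : r ∈ pvG A c := by
        unfold pvAlt at h
        by_cases h2 : c % 2 == 0 <;> simp [h2] at h <;> exact h
      have := (List.mem_filter.mp hg).2
      have hmin : min (pvLz r) A.length = c := by simpa using this
      omega

theorem pvStep (A : List (List Int)) (c : Nat) (hc : c < A.length) :
    pvMove c (pvPrefix A c ++ pvTail A c).length (pvPrefix A c ++ pvTail A c) =
      pvPrefix A (c + 1) ++ pvTail A (c + 1) := by
  rw [pvPass_eq, pvPrefix_succ]
  have hP1 : (pvPrefix A c).filter (fun r => !decide (c < pvLz r)) = pvPrefix A c := by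
    rw [List.filter_eq_self]
    intro r hr
    have := mem_pvPrefix_lz A c (le_of_lt hc) r hr
    simp; omega
  have hP2 : (pvPrefix A c).filter (fun r => decide (c < pvLz r)) = [] := by
    rw [List.filter_eq_nil_iff]
    intro r hr
    have := mem_pvPrefix_lz A c (le_of_lt hc) r hr
    simp; omega
  have hT1 : (pvT A c).filter (fun r => !decide (c < pvLz r)) = pvG A c := by
    unfold pvT pvG
    rw [List.filter_filter]
    apply List.filter_congr
    intro r _
    rw [Bool.eq_iff_iff]
    simp only [Bool.and_eq_true, decide_eq_true_eq, Bool.not_eq_true', decide_eq_false_iff_not,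
      beq_iff_eq]
    constructor
    · rintro ⟨h1, h2⟩; omega
    · intro h; omega
  have hT2 : (pvT A c).filter (fun r => decide (c < pvLz r)) = pvT A (c + 1) := by
    unfold pvT
    rw [List.filter_filter]
    apply List.filter_congr
    intro r _
    rw [Bool.eq_iff_iff]
    simp only [Bool.and_eq_true, decide_eq_true_eq]
    constructor
    · rintro ⟨h1, h2⟩; omega
    · intro h; omega
  unfold pvTail pvAlt
  by_cases h2 : c % 2 = 0
  · have h3 : ¬ (c + 1) % 2 = 0 := by omega
    simp only [h2, h3, decide_true, decide_false, if_true, if_false, beq_iff_eq]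
    rw [List.filter_append, List.filter_append, hP1, hP2, hT1, hT2]
    simp
  · have h3 : (c + 1) % 2 = 0 := by omega
    simp only [h2, h3, decide_true, decide_false, if_true, if_false, beq_iff_eq]
    rw [List.filter_append, List.filter_append, List.filter_reverse, List.filter_reverse,
      hP1, hP2, hT1, hT2]
    simp

theorem pvTail_zero (A : List (List Int)) : pvTail A 0 = A := by
  unfold pvTail pvT
  simp

theorem pvPT_perm (A : List (List Int)) : ∀ (c : Nat), c ≤ A.length →
    (pvPrefix A c ++ pvTail A c).Perm A := by
  intro c
  induction c with
  | zero => intro _; simp [pvPrefix, pvTail_zero]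
  | succ c ih =>
    intro h
    have h1 := pvStep A c (by omega)
    rw [← h1]
    exact List.Perm.trans (pvPass_perm c _) (ih (by omega))

theorem perm_all_eq {α : Type} {l₁ l₂ : List α} (h : l₁.Perm l₂) (p : α → Bool) :
    l₁.all p = l₂.all p := by
  rw [Bool.eq_iff_iff, List.all_eq_true, List.all_eq_true]
  constructor <;> intro hh r hr
  · exact hh r (h.mem_iff.mpr hr)
  · exact hh r (h.mem_iff.mp hr)

theorem pvInv (A : List (List Int)) : ∀ (c : Nat), c ≤ A.length →
    (List.range c).foldl
      (fun st k =>
        let M := pvMove k st.1.length st.1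
        if M.all (fun row => (PySem.List.pyGet? row (k : Int)).getD 1 == 0)
        then (M, st.2 ++ [(k : Int)])
        else (M, st.2))
      (A, []) =
      (pvPrefix A c ++ pvTail A c,
       ((List.range c).filter
          (fun (k : Nat) => A.all (fun row => (PySem.List.pyGet? row (k : Int)).getD 1 == 0))).map
          (fun (k : Nat) => (k : Int))) := by
  intro c
  induction c with
  | zero => intro _; simp [pvPrefix, pvTail_zero]
  | succ c ih =>
    intro h
    rw [List.range_succ, List.foldl_append, ih (by omega)]
    simp only [List.foldl_cons, List.foldl_nil]
    have hM : pvMove c (pvPrefix A c ++ pvTail A c).length (pvPrefix A c ++ pvTail A c)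
        = pvPrefix A (c + 1) ++ pvTail A (c + 1) := pvStep A c (by omega)
    simp only [hM]
    have hall : (pvPrefix A (c + 1) ++ pvTail A (c + 1)).all
          (fun row => (PySem.List.pyGet? row (c : Int)).getD 1 == 0)
        = A.all (fun row => (PySem.List.pyGet? row (c : Int)).getD 1 == 0) :=
      perm_all_eq (pvPT_perm A (c + 1) (by omega)) _
    rw [hall, List.filter_append, List.map_append]
    by_cases hp : (A.all fun row => (PySem.List.pyGet? row (c : Int)).getD 1 == 0) = true
    · rw [if_pos hp]
      simp only [PySem.List.pyGet?_natCast] at hp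
      simp [hp]
    · rw [if_neg hp]
      simp only [PySem.List.pyGet?_natCast] at hp
      simp [hp]

theorem pvAlt_len (A : List (List Int)) : pvAlt A A.length = pvTail A A.length := by
  unfold pvAlt pvTail pvG pvT
  have hf : A.filter (fun r => min (pvLz r) A.length == A.length)
      = A.filter (fun r => decide (A.length ≤ pvLz r)) := by
    apply List.filter_congr
    intro r _
    rw [Bool.eq_iff_iff]
    simp
  rw [hf]

-- A's result rows: the parity-reversed buckets in key order
theorem stairCase_eq (A : List (List Int)) :
    stairCase A =
      (pvPrefix A (A.length + 1),
       ((List.range A.length).filter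
          (fun (k : Nat) => A.all (fun row => (PySem.List.pyGet? row (k : Int)).getD 1 == 0))).map
          (fun (k : Nat) => (k : Int))) := by
  unfold stairCase
  rw [pvInv A A.length le_rfl, pvPrefix_succ, pvAlt_len]

-- lead(row) over row[:R] is min(lead over the whole row, R)
theorem pvLz_take (row : List Int) : ∀ (n : Nat), pvLz (row.take n) = min (pvLz row) n := by
  induction row with
  | nil => intro n; simp [pvLz]
  | cons x t ih =>
    intro n
    cases n with
    | zero => simp [pvLz]
    | succ n =>
      simp only [List.take_succ_cons, pvLz]
      by_cases hx : x = 0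
      · simp [hx, ih]
      · simp [hx]

theorem pvLead_eq (A : List (List Int)) (row : List Int) :
    pvLead A.length row = min (pvLz row) A.length := by
  unfold pvLead
  rw [PySem.List.slice_to_natCast, pvLz_take]

-- filtering the (key, row) pairs on the key then projecting = filtering the rows
theorem pvMapFilter {α : Type} (f : α → Nat) (k : Nat) (A : List α) :
    (((A.map (fun r => (f r, r))).filter (fun p => p.1 == k)).map (·.2))
      = A.filter (fun r => f r == k) := by
  induction A with
  | nil => simp
  | cons x t ih =>
    simp only [List.map_cons, List.filter_cons]
    by_cases h : f x == k <;> simp [h, ih]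

-- bucket k of B's grouping dict is exactly pvG A k
theorem pvGroups_getD (A : List (List Int)) (k : Nat) :
    (A.foldl (fun (d : PySem.Dict Nat (List (List Int))) row =>
        d.modify (pvLead A.length row) [] (· ++ [row])) PySem.Dict.empty).getD k []
      = pvG A k := by
  have h : A.foldl (fun (d : PySem.Dict Nat (List (List Int))) row =>
        d.modify (pvLead A.length row) [] (· ++ [row])) PySem.Dict.empty
      = (A.map (fun r => (pvLead A.length r, r))).foldl
          (fun d p => d.modify p.1 [] (· ++ [p.2])) PySem.Dict.empty := by
    rw [List.foldl_map]
  rw [h, PySem.Dict.getD_foldl_modify_append, PySem.Dict.getD_empty, pvMapFilter]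
  unfold pvG
  apply List.filter_congr
  intro r _
  rw [pvLead_eq]

theorem stairCase_eq_alt (A : List (List Int)) (hpre : Pre_stairCase A) :
    stairCase A = stairCase_alt A := by
  rw [stairCase_eq]
  unfold stairCase_alt
  simp only []
  have hfun : (fun (acc : List (List Int)) (k : Nat) =>
      acc ++ (A.foldl (fun (d : PySem.Dict Nat (List (List Int))) row =>
        d.modify (pvLead A.length row) [] (· ++ [row])) PySem.Dict.empty).getD k [])
      = fun (acc : List (List Int)) (k : Nat) => acc ++ pvG A k := by
    funext acc k
    rw [pvGroups_getD]
  rw [hfun]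
  have hrows : ∀ (c : Nat), c ≤ A.length + 1 →
      pvPrefix A c = (List.range c).foldl (fun acc k => acc ++ pvG A k) [] := by
    intro c
    induction c with
    | zero => intro _; simp [pvPrefix]
    | succ c ih =>
      intro h
      rw [pvPrefix_succ, List.range_succ, List.foldl_append, ← ih (by omega)]
      simp only [List.foldl_cons, List.foldl_nil]
      unfold pvAlt
      by_cases h2 : c % 2 = 0
      · simp [h2]
      · have h1 : c % 2 = 1 := by omega
        have := hpre.2 c (List.mem_range.mpr (by omega)) h1
        simp only [h2, beq_iff_eq, if_false]
        rw [show (pvG A c).reverse = pvG A c from (by unfold pvG; rw [← this])]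
  rw [hrows (A.length + 1) le_rfl]

-- ===== VERDICT (by name: the statement is the Claim_ definition above) =====
theorem stairCase_spec : Claim_equal_stairCase := by
  intro A _ hpre
  unfold Spec_stairCase
  exact stairCase_eq_alt A hpre
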